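-- pv_equiv track=rewrite | github.com/lars-petter-hauge/aoc | 2022/python/day3/day3.py | collect_badges
-- ===== SOURCE A (Python) =====
-- import string
--
-- SCORE = {
--     **{char: i + 1 for i, char in enumerate(string.ascii_lowercase)},
--     **{char: i + 27 for i, char in enumerate(string.ascii_uppercase)},
-- }
--
-- def per_chunk(content, n):
--     i = 0
--     while i < len(content):
--         yield content[i : i + n]
--         i += n
--
-- def collect_badges(rucksacks):
--     badges = []
--     for group_sacks in per_chunk(rucksacks, 3):
--         compartments = set(SCORE.keys())
--         for sack in group_sacks:
--             first, second = sack
--             compartments = compartments.intersection(set(first).union(second))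
--         assert len(compartments) == 1
--         badges.append(compartments)
--     return badges
-- ===== SOURCE B (Python) =====
-- import string
--
-- SCORE = {
--     **{char: i + 1 for i, char in enumerate(string.ascii_lowercase)},
--     **{char: i + 27 for i, char in enumerate(string.ascii_uppercase)},
-- }
--
-- def _badge(counts, size):
--     # badge = letters seen in every sack of the current group
--     badge = {ch for ch, cnt in counts.items() if cnt == size and ch in SCORE}
--     assert len(badge) == 1
--     return badge
--
-- def collect_badges(rucksacks):
--     badges = []
--     counts = {}
--     size = 0
--     for first, second in rucksacks:
--         for ch in set(first) | set(second):
--             counts[ch] = counts.get(ch, 0) + 1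
--         size += 1
--         if size == 3:
--             badges.append(_badge(counts, size))
--             counts = {}
--             size = 0
--     if size != 0:
--         badges.append(_badge(counts, size))
--     return badges
-- ===== Notes on version B (the rewrite author's own statement) =====
-- stated objective: alternative
-- what changed: Replaces A's chunk-then-running-set-intersection narrowing with a single streaming pass that tabulates, per group, how many sacks contain each character in a count dict and then filters the alphabet keys whose count equals the group size.
import Mathlib
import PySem

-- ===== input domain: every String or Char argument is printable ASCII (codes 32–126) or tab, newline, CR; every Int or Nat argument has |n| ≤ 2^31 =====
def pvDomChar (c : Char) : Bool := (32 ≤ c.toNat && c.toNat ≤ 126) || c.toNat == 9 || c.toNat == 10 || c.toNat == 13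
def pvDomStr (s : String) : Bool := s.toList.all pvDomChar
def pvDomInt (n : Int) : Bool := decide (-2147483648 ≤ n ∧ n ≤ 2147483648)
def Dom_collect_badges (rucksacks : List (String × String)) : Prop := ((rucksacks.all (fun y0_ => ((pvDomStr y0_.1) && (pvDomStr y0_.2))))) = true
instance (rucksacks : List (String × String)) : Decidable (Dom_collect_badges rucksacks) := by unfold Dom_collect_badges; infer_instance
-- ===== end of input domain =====

-- B replaces A's chunk-then-running-set-intersection with a streaming pass that counts, per group,
-- how many sacks contain each character and filters the count table; same result (alternative decomposition).

-- ===== PORT A =====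
-- string.ascii_lowercase / string.ascii_uppercase
def pvLowercase : List Char := "abcdefghijklmnopqrstuvwxyz".toList
def pvUppercase : List Char := "ABCDEFGHIJKLMNOPQRSTUVWXYZ".toList

-- SCORE = {**{char: i+1 …lowercase}, **{char: i+27 …uppercase}} (keys are one-char strings; no key collisions)
def SCORE : PySem.Dict String Int :=
  PySem.Dict.ofList
    ((PySem.List.enumerate pvLowercase).map (fun p => (String.mk [p.2], p.1 + 1)) ++
     (PySem.List.enumerate pvUppercase).map (fun p => (String.mk [p.2], p.1 + 27)))

-- the characters of a string, as the one-char strings Python's set(str) holds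
def pvStrs (s : String) : List String := s.toList.map (fun c => String.mk [c])

-- set(first).union(second)  (first, second = sack)
def sackSet (sack : String × String) : PySem.Set String :=
  PySem.Set.union (PySem.Set.ofList (pvStrs sack.1)) (pvStrs sack.2)

-- per_chunk(content, 3): content[i:i+3] slices in order (n = 3 at the sole call site)
def per_chunk (content : List (String × String)) : List (List (String × String)) :=
  if h : content = [] then [] else content.take 3 :: per_chunk (content.drop 3)
termination_by content.length
decreasing_by
  have : 0 < content.length := List.length_pos_iff.mpr h
  simp
  omega

-- port of A; the `assert len(compartments) == 1` raises exactly outside Pre_, where nothing is claimed,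
-- so the port appends the set unchecked
def collect_badges (rucksacks : List (String × String)) : List (List String) :=
  (per_chunk rucksacks).foldl
    (fun badges group_sacks =>
      badges ++
        [group_sacks.foldl
          (fun compartments sack => PySem.Set.inter compartments (sackSet sack))
          (PySem.Set.ofList (PySem.Dict.keys SCORE))])
    []

-- ===== PORT B =====
-- _badge(counts, size); its assert raises exactly outside Pre_, the port returns the set unchecked
def badge_of (counts : PySem.Dict String Int) (size : Int) : List String :=
  ((PySem.Dict.items counts).filter
      (fun p => p.2 == size && PySem.Dict.contains SCORE p.1)).map Prod.fst

-- the loop body of B: tabulate one sack's distinct characters, flush the group every 3 sacks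
def pvStepB (st : List (List String) × PySem.Dict String Int × Int) (sack : String × String) :
    List (List String) × PySem.Dict String Int × Int :=
  let counts := (sackSet sack).foldl (fun d ch => PySem.Dict.modify d ch 0 (· + 1)) st.2.1
  let size := st.2.2 + 1
  if size == 3 then (st.1 ++ [badge_of counts size], PySem.Dict.empty, 0)
  else (st.1, counts, size)

def collect_badges_alt (rucksacks : List (String × String)) : List (List String) :=
  let st := rucksacks.foldl pvStepB ([], PySem.Dict.empty, 0)
  if st.2.2 ≠ 0 then st.1 ++ [badge_of st.2.1 st.2.2] else st.1

-- ===== PRECONDITION & SPEC =====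
-- Pre_ excludes exactly the inputs on which A's `assert len(compartments) == 1` raises AssertionError:
-- every group of (up to) 3 sacks must have exactly one letter common to all its sacks.
-- the 52 alphabet letters as one-char strings (= the keys of SCORE, see keys_SCORE below)
def pvLetterStrs : List String := (pvLowercase ++ pvUppercase).map (fun c => String.mk [c])

-- 'exactly one alphabet letter is common to every sack of the group' (groups are the 3-slices)
def oneCommon (g : List (String × String)) : Prop :=
  (pvLetterStrs.filter (fun s => decide (∀ p ∈ g, s ∈ sackSet p))).length = 1
def Pre_collect_badges (rucksacks : List (String × String)) : Prop :=
  ∀ i ∈ List.range ((rucksacks.length + 2) / 3), oneCommon ((rucksacks.drop (3 * i)).take 3)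
instance (rucksacks : List (String × String)) : Decidable (Pre_collect_badges rucksacks) := by
  unfold Pre_collect_badges oneCommon; infer_instance

def pvWitness_collect_badges : (List (String × String)) :=
  [("ab", "cb"), ("db", "eb"), ("fb", "gb"), ("xq", "x"), ("zx", "yx")]

def Spec_collect_badges (rucksacks : List (String × String)) (out : List (List String)) : Prop := out = collect_badges_alt rucksacks
instance (rucksacks : List (String × String)) (out : List (List String)) : Decidable (Spec_collect_badges rucksacks out) := by unfold Spec_collect_badges; infer_instance

-- ===== CLAIM (what is proved, stated in full; the proofs are below) =====
def Claim_equal_collect_badges : Prop := ∀ (rucksacks : List (String × String)), Dom_collect_badges rucksacks → Pre_collect_badges rucksacks → Spec_collect_badges rucksacks (collect_badges rucksacks)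

-- ===== LEMMAS AND PROOFS =====

-- A's per-group running intersection
def aGroup (g : List (String × String)) : List String :=
  g.foldl (fun compartments sack => PySem.Set.inter compartments (sackSet sack))
    (PySem.Set.ofList (PySem.Dict.keys SCORE))

-- B's per-group count table
def countsOf (g : List (String × String)) : PySem.Dict String Int :=
  g.foldl (fun d sack => (sackSet sack).foldl (fun d ch => PySem.Dict.modify d ch 0 (· + 1)) d)
    PySem.Dict.empty

def bGroup (g : List (String × String)) : List String :=
  badge_of (countsOf g) (g.length : Int)

theorem per_chunk_cons (content : List (String × String)) (h : content ≠ []) :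
    per_chunk content = content.take 3 :: per_chunk (content.drop 3) := by
  rw [per_chunk]; simp [h]

theorem aGroup_eq_map :
    ∀ (r : List (String × String)), collect_badges r = (per_chunk r).map aGroup := by
  intro r
  unfold collect_badges
  simpa using PySem.List.foldl_append_singleton_eq_map aGroup (per_chunk r) []

theorem per_chunk_nil : per_chunk [] = [] := by rw [per_chunk]; simp

theorem streamAux : ∀ (n : Nat) (r : List (String × String)), r.length ≤ n → ∀ acc,
    (if (r.foldl pvStepB (acc, PySem.Dict.empty, 0)).2.2 ≠ 0
     then (r.foldl pvStepB (acc, PySem.Dict.empty, 0)).1 ++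
       [badge_of (r.foldl pvStepB (acc, PySem.Dict.empty, 0)).2.1
         (r.foldl pvStepB (acc, PySem.Dict.empty, 0)).2.2]
     else (r.foldl pvStepB (acc, PySem.Dict.empty, 0)).1) = acc ++ (per_chunk r).map bGroup := by
  intro n
  induction n with
  | zero =>
    intro r hr acc
    have : r = [] := List.length_eq_zero_iff.mp (Nat.le_zero.mp hr)
    subst this
    simp [per_chunk_nil]
  | succ n ih =>
    intro r hr acc
    match r with
    | [] => simp [per_chunk_nil]
    | [a] =>
      have h1 : ([a] : List (String × String)).foldl pvStepB (acc, PySem.Dict.empty, 0)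
          = (acc, countsOf [a], 1) := by norm_num [pvStepB, countsOf]
      rw [h1, per_chunk_cons _ (by simp)]
      norm_num [per_chunk_nil, bGroup, countsOf]
    | [a, b] =>
      have h1 : ([a, b] : List (String × String)).foldl pvStepB (acc, PySem.Dict.empty, 0)
          = (acc, countsOf [a, b], 2) := by norm_num [pvStepB, countsOf]
      rw [h1, per_chunk_cons _ (by simp)]
      norm_num [per_chunk_nil, bGroup, countsOf]
    | a :: b :: c :: rest =>
      have hlen : rest.length ≤ n := by simp at hr; omega
      have hstep : (a :: b :: c :: rest).foldl pvStepB (acc, PySem.Dict.empty, 0)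
          = rest.foldl pvStepB (acc ++ [bGroup [a, b, c]], PySem.Dict.empty, 0) := by
        norm_num [pvStepB, bGroup, countsOf]
      have hchunk : per_chunk (a :: b :: c :: rest) = [a, b, c] :: per_chunk rest := by
        rw [per_chunk_cons _ (by simp)]; rfl
      rw [hstep, ih rest hlen, hchunk]
      simp

theorem bGroup_eq_map :
    ∀ (r : List (String × String)), collect_badges_alt r = (per_chunk r).map bGroup := by
  intro r
  unfold collect_badges_alt
  exact streamAux r.length r (le_refl _) []

theorem per_chunk_ne_nil : ∀ (r : List (String × String)), ∀ g ∈ per_chunk r, g ≠ [] := by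
  intro r
  fun_induction per_chunk r with
  | case1 => simp
  | case2 content h ih =>
    intro g hg
    rw [← per_chunk_cons content h] at hg
    rw [per_chunk_cons content h] at hg
    rcases List.mem_cons.mp hg with rfl | hg
    · simp [List.take_eq_nil_iff, h]
    · exact ih g hg

-- the sack sets are duplicate-free
theorem nodup_sackSet (p : String × String) : (sackSet p).Nodup :=
  PySem.Set.nodup_union _ _ (PySem.Set.nodup_ofList _)

-- membership in A's running intersection
theorem mem_foldl_inter (g : List (String × String)) :
    ∀ (init : PySem.Set String) (s : String),
      s ∈ g.foldl (fun compartments sack => PySem.Set.inter compartments (sackSet sack)) init ↔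
        s ∈ init ∧ ∀ p ∈ g, s ∈ sackSet p := by
  induction g with
  | nil => simp
  | cons a t ih =>
    intro init s
    rw [List.foldl_cons, ih, PySem.Set.mem_inter]
    constructor
    · rintro ⟨⟨h1, h2⟩, h3⟩
      exact ⟨h1, by simpa [h2] using h3⟩
    · rintro ⟨h1, h2⟩
      exact ⟨⟨h1, h2 a (by simp)⟩, fun p hp => h2 p (by simp [hp])⟩

theorem mem_aGroup (g : List (String × String)) (s : String) :
    s ∈ aGroup g ↔ s ∈ PySem.Dict.keys SCORE ∧ ∀ p ∈ g, s ∈ sackSet p := by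
  rw [aGroup, mem_foldl_inter, PySem.Set.mem_ofList]

theorem nodup_aGroup (g : List (String × String)) : (aGroup g).Nodup := by
  rw [aGroup]
  generalize hinit : PySem.Set.ofList (PySem.Dict.keys SCORE) = init
  have hinit' : init.Nodup := hinit ▸ PySem.Set.nodup_ofList _
  clear hinit
  induction g generalizing init with
  | nil => exact hinit'
  | cons a t ih => exact ih _ (PySem.Set.nodup_inter _ _ hinit')

-- the count table holds, for each character, the number of sacks of the group containing it
theorem getD_countsOf_aux (g : List (String × String)) :
    ∀ (d : PySem.Dict String Int) (s : String),
      (g.foldl (fun d sack => (sackSet sack).foldl (fun d ch => PySem.Dict.modify d ch 0 (· + 1)) d) d).getD s 0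
        = d.getD s 0 + (g.countP (fun p => decide (s ∈ sackSet p)) : Int) := by
  induction g with
  | nil => simp
  | cons a t ih =>
    intro d s
    rw [List.foldl_cons, ih, PySem.Dict.getD_foldl_modify_add_one,
      (nodup_sackSet a).count (l := sackSet a)]
    rw [List.countP_cons]
    by_cases hm : s ∈ sackSet a
    · simp [hm]; ring
    · simp [hm]

theorem getD_countsOf (g : List (String × String)) (s : String) :
    (countsOf g).getD s 0 = (g.countP (fun p => decide (s ∈ sackSet p)) : Int) := by
  rw [countsOf, getD_countsOf_aux]
  simp [PySem.Dict.getD_empty]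

theorem nodup_keys_countsOf (g : List (String × String)) : (countsOf g).keys.Nodup := by
  rw [countsOf]
  generalize hd : (PySem.Dict.empty : PySem.Dict String Int) = d
  have hd' : d.keys.Nodup := hd ▸ PySem.Dict.nodup_keys_empty
  clear hd
  induction g generalizing d with
  | nil => exact hd'
  | cons a t ih =>
    exact ih _ (PySem.Dict.nodup_keys_foldl_modify_key (sackSet a) id 0 (fun _ _ => (· + 1)) d hd')

theorem mem_bGroup (g : List (String × String)) (hg : g ≠ []) (s : String) :
    s ∈ bGroup g ↔ s ∈ PySem.Dict.keys SCORE ∧ ∀ p ∈ g, s ∈ sackSet p := by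
  have hnd := nodup_keys_countsOf g
  rw [bGroup, badge_of]
  constructor
  · intro hmem
    rcases List.mem_map.mp hmem with ⟨p, hkv, hfst⟩
    rcases List.mem_filter.mp hkv with ⟨hitems, hcond⟩
    rw [Bool.and_eq_true] at hcond
    have hv' : p.2 = (g.length : Int) := beq_iff_eq.mp hcond.1
    have hsc : PySem.Dict.contains SCORE s = true := by rw [← hfst]; exact hcond.2
    have hitems' : (s, p.2) ∈ (countsOf g).items := by
      rw [← hfst]
      simpa using hitems
    have hget : (countsOf g).getD s 0 = p.2 := PySem.Dict.getD_of_mem_items _ hitems' hnd 0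
    have hcount : (g.countP (fun p => decide (s ∈ sackSet p)) : Int) = (g.length : Int) := by
      rw [← getD_countsOf, hget, hv']
    have hall : ∀ p ∈ g, s ∈ sackSet p := by
      have hc : g.countP (fun p => decide (s ∈ sackSet p)) = g.length := by exact_mod_cast hcount
      intro p hp
      simpa using List.countP_eq_length.mp hc p hp
    exact ⟨(PySem.Dict.contains_iff_mem_keys SCORE s).mp hsc, hall⟩
  · rintro ⟨hsc, hall⟩
    have hc : g.countP (fun p => decide (s ∈ sackSet p)) = g.length :=
      List.countP_eq_length.mpr (fun p hp => by simpa using hall p hp)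
    have hget : (countsOf g).getD s 0 = (g.length : Int) := by
      rw [getD_countsOf, hc]
    have hlen : 0 < g.length := List.length_pos_iff.mpr hg
    have hcont : (countsOf g).contains s = true := by
      by_contra hfalse
      have : (countsOf g).getD s 0 = 0 :=
        PySem.Dict.getD_of_not_contains _ 0 (Bool.not_eq_true _ ▸ (Bool.eq_false_iff.mpr hfalse))
      rw [hget] at this
      omega
    have hkeys : s ∈ (countsOf g).keys := (PySem.Dict.contains_iff_mem_keys _ s).mp hcont
    have hitems : (s, (countsOf g).getD s 0) ∈ (countsOf g).items := by
      rw [PySem.Dict.items_eq_map_keys _ hnd 0]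
      exact List.mem_map.mpr ⟨s, hkeys, rfl⟩
    refine List.mem_map.mpr ⟨(s, (countsOf g).getD s 0), List.mem_filter.mpr ⟨hitems, ?_⟩, rfl⟩
    simp [hget, (PySem.Dict.contains_iff_mem_keys SCORE s).mpr hsc]

theorem nodup_bGroup (g : List (String × String)) : (bGroup g).Nodup := by
  have hnd := nodup_keys_countsOf g
  have hsub : ((((countsOf g).items.filter
      (fun p => p.2 == (g.length : Int) && PySem.Dict.contains SCORE p.1)).map Prod.fst).Sublist
        ((countsOf g).items.map Prod.fst)) :=
    List.Sublist.map Prod.fst List.filter_sublist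
  have hkeys : (countsOf g).items.map Prod.fst = (countsOf g).keys := rfl
  rw [bGroup, badge_of]
  exact List.Nodup.sublist hsub (hkeys ▸ hnd)

theorem eq_singleton_of_nodup (l : List String) (c : String) (hn : l.Nodup)
    (h : ∀ x, x ∈ l ↔ x = c) : l = [c] := by
  match l with
  | [] => exact absurd ((h c).mpr rfl) (by simp)
  | [a] => simpa using (h a).mp (by simp)
  | a :: b :: t =>
    have ha : a = c := (h a).mp (by simp)
    have hb : b = c := (h b).mp (by simp)
    subst ha; subst hb
    simp at hn

theorem per_chunk_mem : ∀ (r : List (String × String)), ∀ g ∈ per_chunk r,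
    ∃ i, 3 * i < r.length ∧ g = (r.drop (3 * i)).take 3 := by
  intro r
  fun_induction per_chunk r with
  | case1 => simp
  | case2 content h ih =>
    intro g hg
    rw [← per_chunk_cons content h] at hg
    rw [per_chunk_cons content h] at hg
    rcases List.mem_cons.mp hg with rfl | hg
    · exact ⟨0, by simpa using List.length_pos_iff.mpr h, by simp⟩
    · rcases ih g hg with ⟨i, hi, rfl⟩
      refine ⟨i + 1, ?_, ?_⟩
      · have := hi
        simp [List.length_drop] at this
        omega
      · rw [List.drop_drop]
        ring_nf

set_option maxRecDepth 40000 in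
theorem keys_SCORE : PySem.Dict.keys SCORE = pvLetterStrs := by decide

theorem group_eq (g : List (String × String)) (hg : g ≠ [])
    (hpre : oneCommon g) :
    aGroup g = bGroup g := by
  rcases List.length_eq_one_iff.mp hpre with ⟨c, hc⟩
  have hmemc : ∀ x : String,
      (x ∈ PySem.Dict.keys SCORE ∧ ∀ p ∈ g, x ∈ sackSet p) ↔ x = c := by
    intro x
    rw [keys_SCORE, ← List.mem_singleton, ← hc, List.mem_filter]
    simp
  rw [eq_singleton_of_nodup (aGroup g) c (nodup_aGroup g)
        (fun x => (mem_aGroup g x).trans (hmemc x)),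
      eq_singleton_of_nodup (bGroup g) c (nodup_bGroup g)
        (fun x => (mem_bGroup g hg x).trans (hmemc x))]

-- ===== VERDICT (by name: the statement is the Claim_ definition above) =====
theorem collect_badges_spec : Claim_equal_collect_badges := by
  intro r _hdom hpre
  unfold Spec_collect_badges
  rw [aGroup_eq_map, bGroup_eq_map]
  refine List.map_congr_left (fun g hgm => group_eq g (per_chunk_ne_nil r g hgm) ?_)
  rcases per_chunk_mem r g hgm with ⟨i, hi, rfl⟩
  exact hpre i (List.mem_range.mpr (by omega))
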